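-- pv_equiv track=rewrite | github.com/SantaDiver/mapReduce | mm.py | reducefn
-- ===== SOURCE A (Python) =====
-- def reducefn(key, vals):
--     res = 0
--     used = {}
--     for val in vals:
--         if val[0] in used:
--             res += used[val[0]] * val[1]
--         else:
--             used[val[0]] = val[1]
--
--     return res%97
-- ===== SOURCE B (Python) =====
-- def reducefn(key, vals):
--     # One grouping pass: per distinct val[0], record the first-seen val[1] and the
--     # running total of all val[1]; then sum first*(total-first) over the groups.
--     acc = {}
--     for val in vals:
--         k = val[0]
--         if k in acc:
--             f, t = acc[k]
--             acc[k] = (f, t + val[1])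
--         else:
--             acc[k] = (val[1], val[1])
--     return sum(f * (t - f) for f, t in acc.values()) % 97
-- ===== Notes on version B (the rewrite author's own statement) =====
-- stated objective: alternative
-- what changed: Instead of accumulating products pair-by-pair against the first-seen value, B builds a per-key table of (first-seen value, running total) in one grouping pass and computes the answer as sum of first*(total-first) over the distinct keys.
import Mathlib
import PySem

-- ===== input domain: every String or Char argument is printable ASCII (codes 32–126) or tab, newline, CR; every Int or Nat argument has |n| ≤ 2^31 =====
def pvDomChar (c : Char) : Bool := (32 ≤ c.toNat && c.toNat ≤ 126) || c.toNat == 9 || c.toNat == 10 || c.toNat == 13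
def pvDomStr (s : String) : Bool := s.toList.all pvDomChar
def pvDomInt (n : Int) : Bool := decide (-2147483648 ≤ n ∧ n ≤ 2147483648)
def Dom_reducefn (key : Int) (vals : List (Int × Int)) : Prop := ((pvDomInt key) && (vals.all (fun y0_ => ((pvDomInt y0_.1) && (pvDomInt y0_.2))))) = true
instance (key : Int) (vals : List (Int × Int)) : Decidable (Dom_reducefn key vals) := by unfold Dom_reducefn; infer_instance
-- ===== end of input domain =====

-- B changes the decomposition (per-key grouping table then a closed sum) rather than speed; return values only.

-- ===== PORT A =====
def reducefn (key : Int) (vals : List (Int × Int)) : Int :=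
  let st := vals.foldl (fun (st : Int × PySem.Dict Int Int) val =>
    if st.2.contains val.1 then (st.1 + st.2.getD val.1 0 * val.2, st.2)
    else (st.1, st.2.insert val.1 val.2)) (0, PySem.Dict.empty)
  PySem.Int.mod st.1 97

-- ===== PORT B =====
def reducefn_alt (key : Int) (vals : List (Int × Int)) : Int :=
  let acc := vals.foldl (fun (d : PySem.Dict Int (Int × Int)) val =>
    match d.get? val.1 with
    | some p => d.insert val.1 (p.1, p.2 + val.2)
    | none => d.insert val.1 (val.2, val.2)) PySem.Dict.empty
  PySem.Int.mod ((acc.values.map (fun p => p.1 * (p.2 - p.1))).sum) 97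

-- ===== PRECONDITION & SPEC =====
def Spec_reducefn (key : Int) (vals : List (Int × Int)) (out : Int) : Prop := out = reducefn_alt key vals
instance (key : Int) (vals : List (Int × Int)) (out : Int) : Decidable (Spec_reducefn key vals out) := by unfold Spec_reducefn; infer_instance

-- ===== CLAIM (what is proved, stated in full; the proofs are below) =====
def Claim_equal_reducefn : Prop := ∀ (key : Int) (vals : List (Int × Int)), Dom_reducefn key vals → Spec_reducefn key vals (reducefn key vals)

-- ===== LEMMAS AND PROOFS =====

-- the group sum B computes from its table
def pvS (d : PySem.Dict Int (Int × Int)) : Int :=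
  (d.values.map (fun p => p.1 * (p.2 - p.1))).sum

-- updating the unique item with key k changes the value-sum by g new - g old
lemma sum_map_update (l : List (Int × (Int × Int))) (k : Int) (w old : Int × Int)
    (g : (Int × Int) → Int) (hnd : (l.map (·.1)).Nodup) (hmem : (k, old) ∈ l) :
    (List.map g (List.map (fun x => x.2)
        (List.map (fun p => if p.1 == k then (k, w) else p) l))).sum
      = (List.map g (List.map (fun x => x.2) l)).sum - g old + g w := by
  induction l with
  | nil => cases hmem
  | cons hd tl ih =>
    simp only [List.map_cons, List.nodup_cons] at hnd ⊢
    rcases List.mem_cons.mp hmem with h | hmem'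
    · subst h
      have heq : (tl.map (fun p => if p.1 == k then (k, w) else p)) = tl := by
        conv_rhs => rw [← List.map_id tl]
        apply List.map_congr_left
        intro p hp
        have hp1 : p.1 ∈ List.map (fun x => x.1) tl := List.mem_map_of_mem hp
        have : p.1 ≠ k := fun h => hnd.1 (h ▸ hp1)
        simp [this]
      simp only [List.sum_cons, heq]
      simp
      ring
    · have hm1 : k ∈ List.map (fun x => x.1) tl :=
        List.mem_map_of_mem (f := fun x => x.1) hmem'
      have hne : hd.1 ≠ k := fun h => hnd.1 (h ▸ hm1)
      have hbeq : (hd.1 == k) = false := by simp [hne]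
      simp only [List.sum_cons, hbeq, Bool.false_eq_true, if_false]
      rw [ih hnd.2 hmem']; ring

lemma loop_eq : ∀ (vals : List (Int × Int)) (res : Int) (dA : PySem.Dict Int Int)
    (dB : PySem.Dict Int (Int × Int)),
    dB.keys.Nodup →
    (∀ k, dA.get? k = (dB.get? k).map Prod.fst) →
    (vals.foldl (fun (st : Int × PySem.Dict Int Int) val =>
        if st.2.contains val.1 then (st.1 + st.2.getD val.1 0 * val.2, st.2)
        else (st.1, st.2.insert val.1 val.2)) (res, dA)).1
      = res + pvS (vals.foldl (fun (d : PySem.Dict Int (Int × Int)) val =>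
          match d.get? val.1 with
          | some p => d.insert val.1 (p.1, p.2 + val.2)
          | none => d.insert val.1 (val.2, val.2)) dB) - pvS dB := by
  intro vals
  induction vals with
  | nil => intro res dA dB hnd hco; simp
  | cons val tl ih =>
    intro res dA dB hnd hco
    obtain ⟨k, v⟩ := val
    simp only [List.foldl_cons]
    rcases hB : dB.get? k with _ | ⟨f, t⟩
    · -- key fresh in both dicts
      have hA : dA.get? k = none := by rw [hco]; simp [hB]
      have hcont : dA.contains k = false := by
        rw [PySem.Dict.contains_eq_isSome_get?, hA]; rfl
      have hcontB : dB.contains k = false := by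
        rw [PySem.Dict.contains_eq_isSome_get?, hB]; rfl
      simp only [hB, hcont, Bool.false_eq_true, if_false]
      rw [ih res (dA.insert k v) (dB.insert k (v, v))
          (PySem.Dict.nodup_keys_insert _ _ _ hnd)
          (by intro j; by_cases hj : j = k
              · subst hj; simp [PySem.Dict.get?_insert_self]
              · rw [PySem.Dict.get?_insert_of_ne _ _ hj,
                    PySem.Dict.get?_insert_of_ne _ _ hj, hco])]
      have hS : pvS (dB.insert k (v, v)) = pvS dB := by
        unfold pvS
        simp only [PySem.Dict.values,
          PySem.Dict.items_insert_of_not_contains _ _ hcontB]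
        simp
      rw [hS]
    · -- key present in both dicts
      have hA : dA.get? k = some f := by rw [hco, hB]; rfl
      have hcont : dA.contains k = true := by
        rw [PySem.Dict.contains_eq_isSome_get?, hA]; rfl
      have hcontB : dB.contains k = true := by
        rw [PySem.Dict.contains_eq_isSome_get?, hB]; rfl
      have hgetD : dA.getD k 0 = f := PySem.Dict.getD_of_get?_eq_some _ _ hA
      simp only [hB, hcont, if_true, hgetD]
      rw [ih (res + f * v) dA (dB.insert k (f, t + v))
          (PySem.Dict.nodup_keys_insert _ _ _ hnd)
          (by intro j; by_cases hj : j = k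
              · subst hj; simp [PySem.Dict.get?_insert_self, hA]
              · rw [PySem.Dict.get?_insert_of_ne _ _ hj, hco])]
      have hmem : (k, (f, t)) ∈ dB.items :=
        PySem.Dict.mem_items_of_get?_eq_some _ hB
      have hS : pvS (dB.insert k (f, t + v)) = pvS dB + f * v := by
        unfold pvS
        simp only [PySem.Dict.values,
          PySem.Dict.items_insert_of_contains _ _ hcontB]
        rw [sum_map_update dB.items k (f, t + v) (f, t) _ hnd hmem]
        ring
      rw [hS]; ring

-- ===== VERDICT (by name: the statement is the Claim_ definition above) =====
theorem reducefn_spec : Claim_equal_reducefn := by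
  intro key vals _
  simp only [Spec_reducefn, reducefn, reducefn_alt]
  rw [loop_eq vals 0 PySem.Dict.empty PySem.Dict.empty
      PySem.Dict.nodup_keys_empty (by intro k; simp [PySem.Dict.get?_empty])]
  simp [pvS, PySem.Dict.values, PySem.Dict.empty, PySem.Dict.items]
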